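-- pv_equiv track=rewrite | github.com/KoSv/schillinger | schillinger.py | binary_syncronisation_result
-- ===== SOURCE A (Python) =====
-- def binary_syncronisation_result(fraction, seq_len):
--     result = []
--     count = 1
--     flag = True
--     for i in range(1, seq_len):
--         for m in fraction:
--             if i % m == 0:
--                 flag = True
--                 break
--             else:
--                 flag = False
--         if flag:
--             result.append(count)
--             count = 1
--         else:
--             count += 1
--     result.append(count)
--     return result
-- ===== SOURCE B (Python) =====
-- def binary_syncronisation_result(fraction, seq_len):
--     # Sieve: mark every index < seq_len that some fraction value divides (a zero
--     # value has no positive multiples, so it marks nothing), then one gap pass.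
--     marked = [False] * max(seq_len, 0)
--     for m in fraction:
--         s = abs(m)
--         if s:
--             for j in range(s, seq_len, s):
--                 marked[j] = True
--     gaps = []
--     count = 1
--     for i in range(1, seq_len):
--         if marked[i]:
--             gaps.append(count)
--             count = 1
--         else:
--             count += 1
--     gaps.append(count)
--     return gaps
-- ===== Notes on version B (the rewrite author's own statement) =====
-- stated objective: faster
-- what changed: Replaces A's per-index scan of fraction (checking i % m for every m at every i) by a sieve that marks the multiples of each |m| once, followed by a single gap-collecting pass.
-- intended difference: On empty fraction with seq_len >= 2, A returns [1]*seq_len because the stale flag=True from initialization survives the empty inner loop, while B returns [seq_len], the intended single run-length when no index is divisible by any fraction value. — e.g. on binary_syncronisation_result([], 3): A returns [1, 1, 1], B returns [3]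
import Mathlib
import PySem

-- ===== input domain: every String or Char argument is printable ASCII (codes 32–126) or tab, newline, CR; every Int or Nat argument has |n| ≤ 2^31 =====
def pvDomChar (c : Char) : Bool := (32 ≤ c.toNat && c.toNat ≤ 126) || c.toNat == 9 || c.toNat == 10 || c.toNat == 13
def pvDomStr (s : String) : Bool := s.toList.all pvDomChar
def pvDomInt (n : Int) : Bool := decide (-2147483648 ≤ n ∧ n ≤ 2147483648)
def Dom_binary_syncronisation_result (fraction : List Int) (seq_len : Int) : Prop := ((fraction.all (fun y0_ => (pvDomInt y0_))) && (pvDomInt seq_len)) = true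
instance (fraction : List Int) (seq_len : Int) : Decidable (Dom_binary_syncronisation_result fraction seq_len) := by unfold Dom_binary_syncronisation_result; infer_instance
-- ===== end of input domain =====

-- B replaces A's per-index scan of `fraction` by a divisibility sieve (mark multiples of each
-- nonzero |m| once, then one gap pass); objective: faster (asymptotic).

-- ===== PORT A =====
-- inner `for m in fraction: if i % m == 0: flag=True; break; else: flag=False`
-- (returns the flag; an empty `fraction` leaves the incoming flag unchanged, as in Python)
def pvInnerA (fraction : List Int) (i : Int) (flag : Bool) : Bool :=
  match fraction with
  | [] => flag
  | m :: ms => if PySem.Int.mod i m = 0 then true else pvInnerA ms i false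

def binary_syncronisation_result (fraction : List Int) (seq_len : Int) : List Int :=
  let st := (PySem.List.pyRange 1 seq_len 1).foldl
    (fun (st : List Int × Int × Bool) i =>
      let flag := pvInnerA fraction i st.2.2
      if flag then (st.1 ++ [st.2.1], 1, true) else (st.1, st.2.1 + 1, false))
    ([], 1, true)
  st.1 ++ [st.2.1]

-- ===== PORT B =====
-- inner `s = abs(m); if s: for j in range(s, seq_len, s): marked[j] = True` of Source B
-- (`marked[j] = True` is List.set at j.toNat; every j produced is ≥ 0 and < len(marked))
def pvMark (acc : List Bool) (m : Int) (seq_len : Int) : List Bool :=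
  if |m| = 0 then acc
  else (PySem.List.pyRange |m| seq_len |m|).foldl (fun a j => a.set j.toNat true) acc

def binary_syncronisation_result_alt (fraction : List Int) (seq_len : Int) : List Int :=
  let marked := fraction.foldl (fun a m => pvMark a m seq_len)
    (List.replicate (max seq_len 0).toNat false)
  let st := (PySem.List.pyRange 1 seq_len 1).foldl
    (fun (st : List Int × Int) i =>
      if marked.getD i.toNat false then (st.1 ++ [st.2], 1) else (st.1, st.2 + 1))
    ([], 1)
  st.1 ++ [st.2]

-- ===== PRECONDITION & SPEC =====
-- Pre_ holds exactly where Python A returns: with a 0 in fraction, A raises ZeroDivisionError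
-- unless no index is visited (seq_len <= 1) or a +-1 precedes the first 0 (then every visited
-- index i, in particular i = 1, is divided before the scan reaches the 0; conversely covering
-- i = 1 needs a +-1 in that prefix). Nothing that A returns on is excluded.
def Pre_binary_syncronisation_result (fraction : List Int) (seq_len : Int) : Prop :=
  (0 : Int) ∉ fraction ∨ seq_len ≤ 1 ∨
    (1 : Int) ∈ fraction.takeWhile (fun m => decide (m ≠ (0 : Int))) ∨
    (-1 : Int) ∈ fraction.takeWhile (fun m => decide (m ≠ (0 : Int)))
instance (fraction : List Int) (seq_len : Int) : Decidable (Pre_binary_syncronisation_result fraction seq_len) := by unfold Pre_binary_syncronisation_result; infer_instance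

def pvWitness_binary_syncronisation_result : List Int × Int := ([2, 3], 8)

-- On empty `fraction` with seq_len ≥ 2, A returns [1]*seq_len because the stale flag=True from
-- initialization survives the empty inner loop, while B returns [seq_len] — the intended single
-- run-length when no index is divisible by any fraction value.
def D_binary_syncronisation_result (fraction : List Int) (seq_len : Int) : Prop :=
  fraction = [] ∧ 2 ≤ seq_len
instance (fraction : List Int) (seq_len : Int) : Decidable (D_binary_syncronisation_result fraction seq_len) := by unfold D_binary_syncronisation_result; infer_instance

def Spec_binary_syncronisation_result (fraction : List Int) (seq_len : Int) (out : List Int) : Prop := ¬ D_binary_syncronisation_result fraction seq_len → out = binary_syncronisation_result_alt fraction seq_len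
instance (fraction : List Int) (seq_len : Int) (out : List Int) : Decidable (Spec_binary_syncronisation_result fraction seq_len out) := by unfold Spec_binary_syncronisation_result; infer_instance

def pvDiffWitness_binary_syncronisation_result : List Int × Int := ([], 3)
def pvDiffWitnessOut_binary_syncronisation_result : (List Int) × (List Int) := ([1, 1, 1], [3])


-- ===== CLAIM (what is proved, stated in full; the proofs are below) =====
def Claim_unchanged_binary_syncronisation_result : Prop := ∀ (fraction : List Int) (seq_len : Int), Dom_binary_syncronisation_result fraction seq_len → Pre_binary_syncronisation_result fraction seq_len → Spec_binary_syncronisation_result fraction seq_len (binary_syncronisation_result fraction seq_len)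
def Claim_changed_binary_syncronisation_result : Prop := Dom_binary_syncronisation_result (pvDiffWitness_binary_syncronisation_result.1) (pvDiffWitness_binary_syncronisation_result.2) ∧ Pre_binary_syncronisation_result (pvDiffWitness_binary_syncronisation_result.1) (pvDiffWitness_binary_syncronisation_result.2) ∧ D_binary_syncronisation_result (pvDiffWitness_binary_syncronisation_result.1) (pvDiffWitness_binary_syncronisation_result.2) ∧ binary_syncronisation_result (pvDiffWitness_binary_syncronisation_result.1) (pvDiffWitness_binary_syncronisation_result.2) = pvDiffWitnessOut_binary_syncronisation_result.1 ∧ binary_syncronisation_result_alt (pvDiffWitness_binary_syncronisation_result.1) (pvDiffWitness_binary_syncronisation_result.2) = pvDiffWitnessOut_binary_syncronisation_result.2 ∧ pvDiffWitnessOut_binary_syncronisation_result.1 ≠ pvDiffWitnessOut_binary_syncronisation_result.2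
def Claim_exact_binary_syncronisation_result : Prop := ∀ (fraction : List Int) (seq_len : Int), Dom_binary_syncronisation_result fraction seq_len → Pre_binary_syncronisation_result fraction seq_len → D_binary_syncronisation_result fraction seq_len → binary_syncronisation_result fraction seq_len ≠ binary_syncronisation_result_alt fraction seq_len

-- ===== LEMMAS AND PROOFS =====

-- the common gap loop both folds compute (with their respective "is i marked" predicate)
def pvGapLoop (p : Int → Bool) : List Int → List Int → Int → List Int
  | [], res, cnt => res ++ [cnt]
  | i :: t, res, cnt =>
    if p i then pvGapLoop p t (res ++ [cnt]) 1 else pvGapLoop p t res (cnt + 1)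

lemma pvInnerA_ne_nil (fraction : List Int) (hne : fraction ≠ []) (i : Int) (flag : Bool) :
    pvInnerA fraction i flag = fraction.any (fun d => decide (d ∣ i)) := by
  induction fraction generalizing flag with
  | nil => exact absurd rfl hne
  | cons m ms ih =>
    simp only [pvInnerA, List.any_cons]
    by_cases h : PySem.Int.mod i m = 0
    · have : m ∣ i := (PySem.Int.mod_eq_zero_iff_dvd i m).mp h
      simp [h, this]
    · have hm : ¬ m ∣ i := fun hd => h ((PySem.Int.mod_eq_zero_iff_dvd i m).mpr hd)
      cases ms with
      | nil => simp [h, hm, pvInnerA]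
      | cons m' ms' => simp [h, hm, ih (by simp)]

-- A's outer loop (triple state; the flag component is write-only once `p` replaces the
-- flag-independent inner scan) computes pvGapLoop
lemma pvGapFold3 (p : Int → Bool) :
    ∀ (L : List Int) (res : List Int) (cnt : Int) (flag : Bool),
      (let st := L.foldl
        (fun (st : List Int × Int × Bool) i =>
          if p i then (st.1 ++ [st.2.1], 1, true) else (st.1, st.2.1 + 1, false))
        (res, cnt, flag)
       st.1 ++ [st.2.1]) = pvGapLoop p L res cnt := by
  intro L
  induction L with
  | nil => intro res cnt flag; rfl
  | cons i t ih =>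
    intro res cnt flag
    rw [List.foldl_cons]
    by_cases h : p i = true
    · rw [if_pos h,
        show pvGapLoop p (i :: t) res cnt = pvGapLoop p t (res ++ [cnt]) 1 from by
          rw [pvGapLoop, if_pos h]]
      exact ih _ _ _
    · rw [if_neg h,
        show pvGapLoop p (i :: t) res cnt = pvGapLoop p t res (cnt + 1) from by
          rw [pvGapLoop, if_neg h]]
      exact ih _ _ _

-- B's outer loop (pair state) computes pvGapLoop
lemma pvGapFold2 (p : Int → Bool) :
    ∀ (L : List Int) (res : List Int) (cnt : Int),
      (let st := L.foldl
        (fun (st : List Int × Int) i =>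
          if p i then (st.1 ++ [st.2], 1) else (st.1, st.2 + 1))
        (res, cnt)
       st.1 ++ [st.2]) = pvGapLoop p L res cnt := by
  intro L
  induction L with
  | nil => intro res cnt; rfl
  | cons i t ih =>
    intro res cnt
    rw [List.foldl_cons]
    by_cases h : p i = true
    · rw [if_pos h,
        show pvGapLoop p (i :: t) res cnt = pvGapLoop p t (res ++ [cnt]) 1 from by
          rw [pvGapLoop, if_pos h]]
      exact ih _ _
    · rw [if_neg h,
        show pvGapLoop p (i :: t) res cnt = pvGapLoop p t res (cnt + 1) from by
          rw [pvGapLoop, if_neg h]]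
      exact ih _ _

lemma pvGapLoop_congr (p q : Int → Bool) :
    ∀ (L : List Int), (∀ i ∈ L, p i = q i) →
      ∀ res cnt, pvGapLoop p L res cnt = pvGapLoop q L res cnt := by
  intro L
  induction L with
  | nil => intro _ _ _; rfl
  | cons i t ih =>
    intro h res cnt
    simp only [pvGapLoop, h i (by simp)]
    by_cases hq : q i = true
    · simp only [hq, if_pos]; exact ih (fun j hj => h j (by simp [hj])) _ _
    · simp only [Bool.not_eq_true] at hq; simp only [hq]
      exact ih (fun j hj => h j (by simp [hj])) _ _

-- setting indices j.toNat (all in range, all ≥ 0) in a Bool list: getD afterwards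
lemma pvSetFold_getD (J : List Int) :
    ∀ (acc : List Bool), (∀ j ∈ J, 0 ≤ j ∧ j.toNat < acc.length) → ∀ (k : Nat),
      (J.foldl (fun a j => a.set j.toNat true) acc).getD k false =
        (acc.getD k false || decide ((k : Int) ∈ J)) := by
  induction J with
  | nil => intro acc _ k; simp
  | cons j t ih =>
    intro acc hJ k
    have hj := hJ j (by simp)
    simp only [List.foldl_cons]
    rw [ih (acc.set j.toNat true)
        (fun j' hj' => by simpa using hJ j' (by simp [hj']))]
    by_cases hk : j.toNat = k
    · subst hk
      rw [List.getD_eq_getElem?_getD, List.getElem?_set_self hj.2]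
      have : (↑j.toNat : Int) = j := Int.toNat_of_nonneg hj.1
      simp [this]
    · rw [List.getD_eq_getElem?_getD, List.getElem?_set_ne hk,
        ← List.getD_eq_getElem?_getD]
      have : ¬ ((k : Int) = j) := by omega
      simp [List.mem_cons, this]

lemma pvSetFold_length (J : List Int) :
    ∀ (acc : List Bool), (J.foldl (fun a j => a.set j.toNat true) acc).length = acc.length := by
  induction J with
  | nil => intro acc; rfl
  | cons j t ih => intro acc; rw [List.foldl_cons, ih]; simp

lemma pvMark_length (acc : List Bool) (m seq_len : Int) :
    (pvMark acc m seq_len).length = acc.length := by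
  unfold pvMark
  split
  · rfl
  · exact pvSetFold_length _ acc

lemma pvMark_getD (acc : List Bool) (m seq_len : Int) (hm : m ≠ 0)
    (hlen : seq_len.toNat ≤ acc.length) (k : Nat) :
    (pvMark acc m seq_len).getD k false =
      (acc.getD k false || decide ((k : Int) ∈ PySem.List.pyRange |m| seq_len |m|)) := by
  rw [pvMark, if_neg (by simpa using hm)]
  apply pvSetFold_getD
  intro j hj
  have hs : (0 : Int) < |m| := abs_pos.mpr hm
  have := (PySem.List.mem_pyRange_iff_of_pos hs j).mp hj
  refine ⟨by omega, by omega⟩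

-- after sieving all of `fraction`: marked[k] ↔ some m ∈ fraction has k among its multiples
lemma pvSieve_getD (seq_len : Int) (fraction : List Int) :
    ∀ (acc : List Bool), acc.length = (max seq_len 0).toNat → ∀ (k : Nat),
      ((fraction.foldl (fun a m => pvMark a m seq_len) acc).getD k false) =
        (acc.getD k false ||
          fraction.any (fun m => decide ((k : Int) ∈ PySem.List.pyRange |m| seq_len |m|))) := by
  induction fraction with
  | nil => intro acc _ k; simp
  | cons m ms ih =>
    intro acc hacc k
    simp only [List.foldl_cons]
    rw [ih (pvMark acc m seq_len) (by rw [pvMark_length, hacc])]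
    by_cases hm : m = 0
    · subst hm
      rw [show pvMark acc 0 seq_len = acc from by rw [pvMark, if_pos (by simp)]]
      simp [PySem.List.pyRange]
    · rw [pvMark_getD acc m seq_len hm (by omega) k]
      simp [Bool.or_assoc]

-- membership in m's multiples-range is plain divisibility, for 1 ≤ i < seq_len
lemma pvMem_range_iff_dvd (m i seq_len : Int) (hm : m ≠ 0) (hi : 1 ≤ i) (hiu : i < seq_len) :
    (i ∈ PySem.List.pyRange |m| seq_len |m|) ↔ m ∣ i := by
  have hs : (0 : Int) < |m| := abs_pos.mpr hm
  rw [PySem.List.mem_pyRange_iff_of_pos hs]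
  constructor
  · rintro ⟨-, -, hd⟩
    exact (abs_dvd m i).mp (dvd_sub_self_right.mp hd)
  · intro hd
    have hd' : |m| ∣ i := (abs_dvd m i).mpr hd
    exact ⟨Int.le_of_dvd (by omega) hd', hiu, dvd_sub_self_right.mpr hd'⟩

lemma pvAny_congr (p q : Int → Bool) :
    ∀ (l : List Int), (∀ x ∈ l, p x = q x) → l.any p = l.any q := by
  intro l
  induction l with
  | nil => intro _; rfl
  | cons x t ih =>
    intro h
    simp only [List.any_cons, h x (by simp), ih (fun y hy => h y (by simp [hy]))]

-- the two loop predicates agree on every index the outer loop visits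
lemma pvPred_agree (fraction : List Int) (seq_len : Int)
    (i : Int) (hi : i ∈ PySem.List.pyRange 1 seq_len 1) :
    ((fraction.foldl (fun a m => pvMark a m seq_len)
        (List.replicate (max seq_len 0).toNat false)).getD i.toNat false) =
      fraction.any (fun d => decide (d ∣ i)) := by
  have hi' : 1 ≤ i ∧ i < seq_len := by
    have := (PySem.List.mem_pyRange_one).mp hi; exact ⟨this.1, this.2⟩
  rw [pvSieve_getD seq_len fraction _ (by simp) i.toNat]
  have hcast : ((i.toNat : Int)) = i := Int.toNat_of_nonneg (by omega)
  have hrep : (List.replicate (max seq_len 0).toNat false).getD i.toNat false = false := by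
    simp only [List.getD_eq_getElem?_getD, List.getElem?_replicate]
    split <;> rfl
  rw [hrep, Bool.false_or]
  refine pvAny_congr _ _ _ (fun m hmem => ?_)
  by_cases hm : m = 0
  · subst hm
    have h1 : PySem.List.pyRange (0 : Int) seq_len 0 = [] := by
      simp [PySem.List.pyRange]
    have h2 : ¬ ((0 : Int) ∣ i) := by omega
    rw [hcast]
    simp [h1, h2]
  · rw [hcast]
    exact decide_eq_decide.mpr (pvMem_range_iff_dvd m i seq_len hm hi'.1 hi'.2)

-- A with empty fraction appends a 1 for every visited index (the stale flag stays True)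
lemma pvAfold_nil_len :
    ∀ (L : List Int) (res : List Int) (cnt : Int),
      (L.foldl
        (fun (st : List Int × Int × Bool) i =>
          let f := pvInnerA ([] : List Int) i st.2.2
          if f then (st.1 ++ [st.2.1], 1, true) else (st.1, st.2.1 + 1, false))
        (res, cnt, true)).1.length = res.length + L.length := by
  intro L
  induction L with
  | nil => intro res cnt; simp
  | cons i t ih =>
    intro res cnt
    rw [List.foldl_cons]
    refine Eq.trans (ih (res ++ [cnt]) 1) ?_
    simp [List.length_append]
    omega

lemma pvBfold_false_res (marked : List Bool) (hm : ∀ k, marked.getD k false = false) :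
    ∀ (L : List Int) (res : List Int) (cnt : Int),
      (L.foldl
        (fun (st : List Int × Int) i =>
          if marked.getD i.toNat false then (st.1 ++ [st.2], 1) else (st.1, st.2 + 1))
        (res, cnt)).1 = res := by
  intro L
  induction L with
  | nil => intro res cnt; rfl
  | cons i t ih =>
    intro res cnt
    rw [List.foldl_cons,
      show (if marked.getD i.toNat false then ((res : List Int) ++ [cnt], (1 : Int))
            else (res, cnt + 1)) = (res, cnt + 1) from by rw [hm]; rfl]
    exact ih _ _

-- ===== VERDICT (by name: the statement is the Claim_ definition above) =====
theorem binary_syncronisation_result_spec : Claim_unchanged_binary_syncronisation_result := by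
  intro fraction seq_len _hDom hPre hD
  cases fraction with
  | nil =>
    have hle : seq_len ≤ 1 := by
      by_contra h
      apply hD
      unfold D_binary_syncronisation_result
      exact ⟨rfl, by omega⟩
    simp [binary_syncronisation_result, binary_syncronisation_result_alt,
      PySem.List.pyRange_one_eq_nil hle]
  | cons m ms =>
    have hfun : (fun (st : List Int × Int × Bool) i =>
          let flag := pvInnerA (m :: ms) i st.2.2
          if flag then (st.1 ++ [st.2.1], 1, true) else (st.1, st.2.1 + 1, false))
        = (fun (st : List Int × Int × Bool) i =>
          if (m :: ms).any (fun d => decide (d ∣ i)) then (st.1 ++ [st.2.1], 1, true)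
          else (st.1, st.2.1 + 1, false)) := by
      funext st i
      rw [show (let flag := pvInnerA (m :: ms) i st.2.2
            if flag then (st.1 ++ [st.2.1], 1, true) else (st.1, st.2.1 + 1, false))
          = (if pvInnerA (m :: ms) i st.2.2 then (st.1 ++ [st.2.1], 1, true)
            else (st.1, st.2.1 + 1, false)) from rfl,
        pvInnerA_ne_nil (m :: ms) (by simp) i st.2.2]
    have hA : binary_syncronisation_result (m :: ms) seq_len
        = pvGapLoop (fun i => (m :: ms).any (fun d => decide (d ∣ i)))
            (PySem.List.pyRange 1 seq_len 1) [] 1 := by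
      rw [binary_syncronisation_result, hfun]
      exact pvGapFold3 _ _ [] 1 true
    have hB : binary_syncronisation_result_alt (m :: ms) seq_len
        = pvGapLoop (fun i =>
            ((m :: ms).foldl (fun a mm => pvMark a mm seq_len)
              (List.replicate (max seq_len 0).toNat false)).getD i.toNat false)
            (PySem.List.pyRange 1 seq_len 1) [] 1 := by
      rw [binary_syncronisation_result_alt]
      exact pvGapFold2 _ _ [] 1
    rw [hA, hB]
    exact pvGapLoop_congr _ _ _
      (fun i hi => (pvPred_agree (m :: ms) seq_len i hi).symm) [] 1

theorem binary_syncronisation_result_changed : Claim_changed_binary_syncronisation_result := by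
  unfold Claim_changed_binary_syncronisation_result; decide

theorem binary_syncronisation_result_tight : Claim_exact_binary_syncronisation_result := by
  intro fraction seq_len _hDom _hPre hD heq
  obtain ⟨hnil, hge⟩ := hD
  subst hnil
  have hA : (binary_syncronisation_result [] seq_len).length
      = (PySem.List.pyRange 1 seq_len 1).length + 1 := by
    rw [binary_syncronisation_result]
    simp only [List.length_append, List.length_cons, List.length_nil]
    rw [pvAfold_nil_len (PySem.List.pyRange 1 seq_len 1) [] 1]
    simp [Nat.add_comm]
  have hB : (binary_syncronisation_result_alt [] seq_len).length = 1 := by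
    rw [binary_syncronisation_result_alt]
    simp only [List.length_append, List.length_cons, List.length_nil]
    rw [pvBfold_false_res _ (fun k => by
        simp only [List.foldl_nil, List.getD_eq_getElem?_getD, List.getElem?_replicate]
        split <;> rfl)
      (PySem.List.pyRange 1 seq_len 1) [] 1]
    simp
  have hlen : (PySem.List.pyRange 1 seq_len 1).length = (seq_len - 1).toNat :=
    PySem.List.length_pyRange_one 1 seq_len
  have : (binary_syncronisation_result [] seq_len).length
      = (binary_syncronisation_result_alt [] seq_len).length := by rw [heq]
  rw [hA, hB, hlen] at this
  omega
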